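-- pv_equiv track=rewrite | github.com/sssutton10/Advent-of-Code | 2024/Code/Code_Day09.py | get_free_spaces
-- ===== SOURCE A (Python) =====
-- def get_free_spaces(disk):
--     free_space = {}
--     ind = 0
--     is_space = False
--     for x in disk:
--         if is_space:
--             free_space[ind] = int(x)
--         is_space = not is_space
--         ind += int(x)
--     return free_space
-- ===== SOURCE B (Python) =====
-- def get_free_spaces(disk):
--     # Prefix-sum table of start positions, then a filtered dict comprehension
--     positions = [0]
--     for x in disk:
--         positions.append(positions[-1] + int(x))
--     return {positions[i]: int(x) for i, x in enumerate(disk) if i % 2 == 1}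
-- ===== Notes on version B (the rewrite author's own statement) =====
-- stated objective: idiomatic
-- what changed: Replaces A's single stateful pass (running position + toggling is_space flag) with a precomputed exclusive prefix-sum table of start positions followed by a parity-filtered dict comprehension over enumerate(disk).
import Mathlib
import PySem

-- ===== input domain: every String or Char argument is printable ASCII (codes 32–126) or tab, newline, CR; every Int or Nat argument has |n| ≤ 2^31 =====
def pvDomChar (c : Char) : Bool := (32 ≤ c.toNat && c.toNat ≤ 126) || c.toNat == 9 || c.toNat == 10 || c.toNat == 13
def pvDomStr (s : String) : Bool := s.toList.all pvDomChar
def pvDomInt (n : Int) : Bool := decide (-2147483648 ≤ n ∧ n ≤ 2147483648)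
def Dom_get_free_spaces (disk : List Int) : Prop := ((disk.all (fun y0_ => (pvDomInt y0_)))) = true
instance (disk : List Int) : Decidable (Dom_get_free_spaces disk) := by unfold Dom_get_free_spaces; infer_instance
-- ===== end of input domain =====

-- B replaces A's single stateful pass with a prefix-sum position table plus a parity-filtered
-- dict comprehension (idiomatic decomposition, same O(n) cost).

-- ===== PORT A =====
def get_free_spaces (disk : List Int) : List (Int × Int) :=
  -- state: (free_space, ind, is_space)
  (disk.foldl
    (fun (st : PySem.Dict Int Int × Int × Bool) x =>
      (if st.2.2 then st.1.insert st.2.1 x else st.1, st.2.1 + x, !st.2.2))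
    (PySem.Dict.empty, 0, false)).1.items

-- ===== PORT B =====
def get_free_spaces_alt (disk : List Int) : List (Int × Int) :=
  let positions := disk.foldl (fun acc x => acc ++ [PySem.List.pyGetD acc (-1) 0 + x]) [0]
  ((PySem.List.enumerate disk 0).foldl
    (fun (d : PySem.Dict Int Int) q =>
      if q.1 % 2 = 1 then d.insert (PySem.List.pyGetD positions q.1 0) q.2 else d)
    PySem.Dict.empty).items

-- ===== PRECONDITION & SPEC =====
def Spec_get_free_spaces (disk : List Int) (out : List (Int × Int)) : Prop := out = get_free_spaces_alt disk
instance (disk : List Int) (out : List (Int × Int)) : Decidable (Spec_get_free_spaces disk out) := by unfold Spec_get_free_spaces; infer_instance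

-- ===== CLAIM (what is proved, stated in full; the proofs are below) =====
def Claim_equal_get_free_spaces : Prop := ∀ (disk : List Int), Dom_get_free_spaces disk → Spec_get_free_spaces disk (get_free_spaces disk)

-- ===== LEMMAS AND PROOFS =====

/-- Common skeleton both ports reduce to: fold over the list carrying
    current position `p` and current index `i`, inserting at odd indices. -/
def specGo : List Int → PySem.Dict Int Int → Int → Nat → PySem.Dict Int Int
  | [], d, _, _ => d
  | x :: xs, d, p, i => specGo xs (if i % 2 = 1 then d.insert p x else d) (p + x) (i + 1)

/-- Exclusive prefix sums starting at `p`. -/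
def prefixes : List Int → Int → List Int
  | [], p => [p]
  | x :: xs, p => p :: prefixes xs (p + x)

lemma pos_fold : ∀ (xs init : List Int) (p : Int),
    xs.foldl (fun acc x => acc ++ [PySem.List.pyGetD acc (-1) 0 + x]) (init ++ [p])
      = init ++ prefixes xs p := by
  intro xs
  induction xs with
  | nil => intro init p; simp [prefixes]
  | cons x xs ih =>
    intro init p
    simp only [List.foldl_cons, PySem.List.pyGetD_neg_one_append_singleton]
    have h : (init ++ [p]) ++ [p + x] = (init ++ [p]) ++ [p + x] := rfl
    rw [show (init ++ [p]) ++ [p + x] = (init ++ [p]) ++ [p + x] from rfl, ih (init ++ [p]) (p + x)]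
    simp [prefixes]

lemma getD_prefixes : ∀ (xs : List Int) (p : Int) (k : Nat), k ≤ xs.length →
    PySem.List.pyGetD (prefixes xs p) (k : Int) 0 = p + (xs.take k).sum := by
  intro xs
  induction xs with
  | nil =>
    intro p k hk
    have hk0 : k = 0 := Nat.le_zero.mp hk
    subst hk0; simp [prefixes]
  | cons x xs ih =>
    intro p k hk
    cases k with
    | zero => simp [prefixes]
    | succ k =>
      have := ih (p + x) k (by simpa using hk)
      simp only [prefixes, PySem.List.pyGetD_natCast] at this ⊢
      simp only [List.getD, List.getElem?_cons_succ] at this ⊢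
      simp [this]
      ring

lemma parity_step (i : Nat) : (!decide (i % 2 = 1)) = decide ((i + 1) % 2 = 1) := by
  rcases Nat.mod_two_eq_zero_or_one i with h | h
  · have h1 : (i + 1) % 2 = 1 := by omega
    simp [h, h1]
  · have h1 : (i + 1) % 2 = 0 := by omega
    simp [h, h1]

lemma foldA_eq : ∀ (xs : List Int) (d : PySem.Dict Int Int) (p : Int) (i : Nat),
    (xs.foldl
      (fun (st : PySem.Dict Int Int × Int × Bool) x =>
        (if st.2.2 then st.1.insert st.2.1 x else st.1, st.2.1 + x, !st.2.2))
      (d, p, decide (i % 2 = 1))).1 = specGo xs d p i := by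
  intro xs
  induction xs with
  | nil => intro d p i; simp [specGo]
  | cons x xs ih =>
    intro d p i
    simp only [List.foldl_cons, specGo]
    rw [parity_step i]
    simp only [decide_eq_true_eq]
    exact ih _ _ _

lemma foldB_eq : ∀ (xs positions : List Int) (i : Nat) (d : PySem.Dict Int Int) (p : Int),
    (∀ k : Nat, k < xs.length → PySem.List.pyGetD positions ((i + k : Nat) : Int) 0 = p + (xs.take k).sum) →
    (PySem.List.enumerate xs (i : Int)).foldl
        (fun (d : PySem.Dict Int Int) q =>
          if q.1 % 2 = 1 then d.insert (PySem.List.pyGetD positions q.1 0) q.2 else d)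
        d = specGo xs d p i := by
  intro xs
  induction xs with
  | nil => intro positions i d p _; simp [PySem.List.enumerate, specGo]
  | cons x xs ih =>
    intro positions i d p hpos
    rw [PySem.List.enumerate_cons]
    simp only [List.foldl_cons, specGo]
    have h0 : PySem.List.pyGetD positions (i : Int) 0 = p := by
      have := hpos 0 (by simp)
      simpa using this
    have hparity : ((i : Int) % 2 = 1) ↔ (i % 2 = 1) := by omega
    have hcast : ((i : Int) + 1) = ((i + 1 : Nat) : Int) := by push_cast; ring
    have hrec : (∀ k : Nat, k < xs.length →
        PySem.List.pyGetD positions (((i + 1) + k : Nat) : Int) 0 = (p + x) + (xs.take k).sum) := by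
      intro k hk
      have := hpos (k + 1) (by simpa using Nat.succ_lt_succ hk)
      have harr : i + (k + 1) = (i + 1) + k := by omega
      rw [harr] at this
      rw [this]
      simp [List.sum_cons]
      ring
    rw [hcast]
    by_cases h : i % 2 = 1
    · rw [if_pos (by exact_mod_cast hparity.mpr h), if_pos h, h0]
      exact ih positions (i + 1) _ _ hrec
    · rw [if_neg (fun hc => h (hparity.mp hc)), if_neg h]
      exact ih positions (i + 1) _ _ hrec

-- ===== VERDICT (by name: the statement is the Claim_ definition above) =====
theorem get_free_spaces_spec : Claim_equal_get_free_spaces := by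
  unfold Claim_equal_get_free_spaces Spec_get_free_spaces
  intro disk _
  unfold get_free_spaces get_free_spaces_alt
  have hpos : disk.foldl (fun acc x => acc ++ [PySem.List.pyGetD acc (-1) 0 + x]) [0]
      = prefixes disk 0 := by
    have := pos_fold disk [] 0
    simpa using this
  simp only [hpos]
  have hA := foldA_eq disk PySem.Dict.empty 0 0
  simp only [show decide ((0 : Nat) % 2 = 1) = false from rfl] at hA
  have hB := foldB_eq disk (prefixes disk 0) 0 PySem.Dict.empty 0
    (fun k hk => by simpa using getD_prefixes disk 0 k (le_of_lt hk))
  simp only [Nat.cast_zero] at hB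
  rw [hA, hB]
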